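-- pv_equiv track=rewrite | github.com/wesleyd/aoc2017 | day21b.py | parse
-- ===== SOURCE A (Python) =====
-- def rot(p):
--     ss = []
--     for i in (range(len(p)-1,-1,-1)):
--         ss.append(''.join([p[j][i] for j in range(len(p))]))
--     return tuple(ss)
--
-- def flip(p):
--     ss = []
--     for i in (range(len(p)-1,-1,-1)):
--         ss.append(''.join([p[i][j] for j in range(len(p))]))
--     return tuple(ss)
--
-- def parse(inp):
--     rules = {}
--     for line in inp.strip().splitlines():
--         l, r = line.split(' => ')
--         l, r = tuple(l.split('/')), tuple(r.split('/'))
--         k = flip(l)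
--         for _ in range(4):
--             rules[l] = r
--             rules[k] = r
--             l = rot(l)
--             k = rot(k)
--     return rules
-- ===== SOURCE B (Python) =====
-- def parse(inp):
--     # Each of the eight orientations is built directly from a table of the
--     # dihedral group's index transforms, instead of repeatedly rotating grids.
--     rules = {}
--     for line in inp.strip().splitlines():
--         left, right = line.split(' => ')
--         g = tuple(left.split('/'))
--         r = tuple(right.split('/'))
--         m = len(g) - 1
--         rng = range(len(g))
--         rules[g] = r
--         for ti, tj in (
--             (lambda i, j: m - i, lambda i, j: j),      # flipped vertically
--             (lambda i, j: j, lambda i, j: m - i),      # quarter turn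
--             (lambda i, j: m - j, lambda i, j: m - i),
--             (lambda i, j: m - i, lambda i, j: m - j),  # half turn
--             (lambda i, j: i, lambda i, j: m - j),      # flipped horizontally
--             (lambda i, j: m - j, lambda i, j: i),
--             (lambda i, j: j, lambda i, j: i),          # transposed
--         ):
--             key = tuple(''.join(g[ti(i, j)][tj(i, j)] for j in rng) for i in rng)
--             rules[key] = r
--     return rules
-- ===== Notes on version B (the rewrite author's own statement) =====
-- stated objective: alternative
-- what changed: Each of the eight grid orientations is produced directly from a table of the dihedral group's closed-form index transforms (one comprehension per orientation), instead of A's loop that repeatedly applies hand-written rot/flip to two evolving grids four times.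
import Mathlib
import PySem

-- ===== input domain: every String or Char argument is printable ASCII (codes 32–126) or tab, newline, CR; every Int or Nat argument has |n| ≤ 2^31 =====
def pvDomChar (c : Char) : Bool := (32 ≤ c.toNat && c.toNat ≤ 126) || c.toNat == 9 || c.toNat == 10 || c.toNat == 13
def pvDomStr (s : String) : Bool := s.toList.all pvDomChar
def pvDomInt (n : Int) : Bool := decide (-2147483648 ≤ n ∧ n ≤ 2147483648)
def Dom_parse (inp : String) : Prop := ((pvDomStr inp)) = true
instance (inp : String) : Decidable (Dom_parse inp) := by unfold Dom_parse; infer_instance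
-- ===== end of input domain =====

-- B builds the 8 grid orientations from a table of closed-form index transforms instead of A's iterated rot/flip loop.

-- ===== PORT A =====

-- ''.join([p[j][i] for j in range(len(p))]) is ported as String.ofList of the char list
-- (exact: joining 1-char strings); p[j][i] via pyGet? (the .getD defaults are only reached
-- where Python raises IndexError, which Pre_parse excludes).
def rotA (p : List String) : List String :=
  (PySem.List.pyRange (PySem.List.len p - 1) (-1) (-1)).foldl
    (fun ss i => ss ++ [String.ofList ((List.range p.length).map (fun (j : Nat) =>
      (PySem.List.pyGet? ((PySem.List.pyGet? p ((j : Nat) : Int)).getD "").toList i).getD ' '))]) []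

def flipA (p : List String) : List String :=
  (PySem.List.pyRange (PySem.List.len p - 1) (-1) (-1)).foldl
    (fun ss i => ss ++ [String.ofList ((List.range p.length).map (fun (j : Nat) =>
      (PySem.List.pyGet? ((PySem.List.pyGet? p i).getD "").toList ((j : Nat) : Int)).getD ' '))]) []

-- one iteration of A's 'for line in …' loop body (state: the rules dict)
def stepA (rules : PySem.Dict (List String) (List String)) (line : String) :
    PySem.Dict (List String) (List String) :=
  match PySem.Str.split? line " => " with
  | some [l, r] =>
    let lg := (PySem.Str.split? l "/").getD []      -- split "/" never returns none (sep ≠ "")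
    let rg := (PySem.Str.split? r "/").getD []
    let st := (List.range 4).foldl
      (fun (st : PySem.Dict (List String) (List String) × List String × List String) _ =>
        ((st.1.insert st.2.1 rg).insert st.2.2 rg, rotA st.2.1, rotA st.2.2))
      (rules, lg, flipA lg)
    st.1
  | _ => rules   -- unreachable under Pre_parse (Python raises ValueError unpacking here)

def parse (inp : String) : List (List String × List String) :=
  ((PySem.Str.splitlines (PySem.Str.strip inp)).foldl stepA PySem.Dict.empty).items

-- ===== PORT B =====

-- tuple(''.join(g[ti(i, j)][tj(i, j)] for j in rng) for i in rng)
def orientB (g : List String) (ti tj : Nat → Nat → Nat) : List String :=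
  (List.range g.length).map (fun i => String.ofList ((List.range g.length).map (fun j =>
    (PySem.List.pyGet? ((PySem.List.pyGet? g ((ti i j : Nat) : Int)).getD "").toList
      ((tj i j : Nat) : Int)).getD ' ')))

def stepB (rules : PySem.Dict (List String) (List String)) (line : String) :
    PySem.Dict (List String) (List String) :=
  match PySem.Str.split? line " => " with
  | some [l, r] =>
    let g := (PySem.Str.split? l "/").getD []
    let rg := (PySem.Str.split? r "/").getD []
    let m := g.length - 1
    ([(fun i _ => m - i, fun _ j => j),
      (fun _ j => j, fun i _ => m - i),
      (fun _ j => m - j, fun i _ => m - i),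
      (fun i _ => m - i, fun _ j => m - j),
      (fun i _ => i, fun _ j => m - j),
      (fun _ j => m - j, fun i _ => i),
      (fun _ j => j, fun i _ => i)] :
        List ((Nat → Nat → Nat) × (Nat → Nat → Nat))).foldl
      (fun rules t => rules.insert (orientB g t.1 t.2) rg) (rules.insert g rg)
  | _ => rules

def parse_alt (inp : String) : List (List String × List String) :=
  ((PySem.Str.splitlines (PySem.Str.strip inp)).foldl stepB PySem.Dict.empty).items

-- ===== PRECONDITION & SPEC =====

-- a line is admitted iff it splits into exactly two parts on ' => ' and every row of its
-- left grid is at least as long as the number of rows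
def lineOK (line : String) : Bool :=
  match PySem.Str.split? line " => " with
  | some [l, _] =>
    let g := (PySem.Str.split? l "/").getD []
    g.all (fun s => g.length ≤ s.toList.length)
  | _ => false

-- Pre_parse is exactly where Python A returns: it excludes only lines that do not split into
-- exactly two parts on ' => ' (A raises ValueError unpacking) and lines whose left grid has a
-- row shorter than the number of rows (A raises IndexError inside rot/flip).
def Pre_parse (inp : String) : Prop :=
  ∀ line ∈ PySem.Str.splitlines (PySem.Str.strip inp), lineOK line = true

instance (inp : String) : Decidable (Pre_parse inp) := by unfold Pre_parse; infer_instance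

def pvWitness_parse : String := "../.# => ##./#../...\n#./.. => .../.../..."

def Spec_parse (inp : String) (out : List (List String × List String)) : Prop := out = parse_alt inp
instance (inp : String) (out : List (List String × List String)) : Decidable (Spec_parse inp out) := by unfold Spec_parse; infer_instance

-- ===== CLAIM (what is proved, stated in full; the proofs are below) =====
def Claim_equal_parse : Prop := ∀ (inp : String), Dom_parse inp → Pre_parse inp → Spec_parse inp (parse inp)

-- ===== LEMMAS AND PROOFS =====

-- Canonical form of an n×n grid: the cell function.
def ofCells (n : Nat) (f : Nat → Nat → Char) : List String :=
  (List.range n).map (fun i => String.ofList ((List.range n).map (fun j => f i j)))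

def cellOf (q : List String) (i j : Nat) : Char := ((q.getD i "").toList).getD j ' '

theorem ofCells_congr {n : Nat} {f f' : Nat → Nat → Char}
    (h : ∀ i j, i < n → j < n → f i j = f' i j) : ofCells n f = ofCells n f' := by
  unfold ofCells
  refine List.map_congr_left (fun i hi => ?_)
  simp only [List.mem_range] at hi
  exact congrArg _ (List.map_congr_left (fun j hj => h i j hi (List.mem_range.mp hj)))

theorem map_eq_ofCells {n : Nat} {F : Nat → String} {g : Nat → Nat → Char}
    (h : ∀ i, i < n → F i = String.ofList ((List.range n).map (fun j => g i j))) :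
    (List.range n).map F = ofCells n g := by
  unfold ofCells
  exact List.map_congr_left (fun i hi => h i (List.mem_range.mp hi))

theorem cell_ofCells (n : Nat) (f : Nat → Nat → Char) {i j : Nat} (hi : i < n) (hj : j < n) :
    cellOf (ofCells n f) i j = f i j := by
  simp [ofCells, cellOf, List.getD, hi, hj]

theorem cell_pyGet (q : List String) (a b : Nat) :
    (PySem.List.pyGet? ((PySem.List.pyGet? q ((a : Nat) : Int)).getD "").toList
      ((b : Nat) : Int)).getD ' ' = cellOf q a b := by
  simp [PySem.List.pyGet?_natCast, cellOf, List.getD]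

theorem rotA_long {q : List String} {n : Nat} (hlen : q.length = n) :
    rotA q = ofCells n (fun i j => cellOf q j (n - 1 - i)) := by
  unfold rotA
  rw [PySem.List.foldl_append_singleton_eq_map, List.nil_append]
  have hlen2 : PySem.List.len q = (n : Int) := by simp [hlen]
  have htn : (((n : Int) - 1) - (-1)).toNat = n := by omega
  rw [hlen2, PySem.List.pyRange_neg_one, htn, List.map_map]
  refine map_eq_ofCells (fun k hkn => ?_)
  simp only [Function.comp]
  refine congrArg String.ofList ?_
  rw [hlen]
  refine List.map_congr_left (fun j hj => ?_)
  have hjn : j < n := List.mem_range.mp hj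
  have hidx : ((n : Int) - 1 - k) = ((n - 1 - k : Nat) : Int) := by omega
  rw [hidx, cell_pyGet]

theorem flipA_long {q : List String} {n : Nat} (hlen : q.length = n) :
    flipA q = ofCells n (fun i j => cellOf q (n - 1 - i) j) := by
  unfold flipA
  rw [PySem.List.foldl_append_singleton_eq_map, List.nil_append]
  have hlen2 : PySem.List.len q = (n : Int) := by simp [hlen]
  have htn : (((n : Int) - 1) - (-1)).toNat = n := by omega
  rw [hlen2, PySem.List.pyRange_neg_one, htn, List.map_map]
  refine map_eq_ofCells (fun k hkn => ?_)
  simp only [Function.comp]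
  refine congrArg String.ofList ?_
  rw [hlen]
  refine List.map_congr_left (fun j hj => ?_)
  have hjn : j < n := List.mem_range.mp hj
  have hidx : ((n : Int) - 1 - k) = ((n - 1 - k : Nat) : Int) := by omega
  rw [hidx, cell_pyGet]

theorem rotA_ofCells (n : Nat) (f : Nat → Nat → Char) :
    rotA (ofCells n f) = ofCells n (fun i j => f j (n - 1 - i)) := by
  rw [rotA_long (n := n) (by simp [ofCells])]
  exact ofCells_congr (fun i j hi hj => cell_ofCells n f hj (by omega))

theorem orientB_eq (q : List String) (ti tj : Nat → Nat → Nat) :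
    orientB q ti tj = ofCells q.length (fun i j => cellOf q (ti i j) (tj i j)) := by
  unfold orientB
  refine map_eq_ofCells (fun i hi => ?_)
  refine congrArg String.ofList ?_
  exact List.map_congr_left (fun j hj => cell_pyGet q (ti i j) (tj i j))

theorem core_eq (d : PySem.Dict (List String) (List String)) (rg : List String)
    (q : List String) :
    ((List.range 4).foldl
      (fun (st : PySem.Dict (List String) (List String) × List String × List String) _ =>
        ((st.1.insert st.2.1 rg).insert st.2.2 rg, rotA st.2.1, rotA st.2.2))
      (d, q, flipA q)).1
    = (let m := q.length - 1
       ([(fun i _ => m - i, fun _ j => j),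
         (fun _ j => j, fun i _ => m - i),
         (fun _ j => m - j, fun i _ => m - i),
         (fun i _ => m - i, fun _ j => m - j),
         (fun i _ => i, fun _ j => m - j),
         (fun _ j => m - j, fun i _ => i),
         (fun _ j => j, fun i _ => i)] :
           List ((Nat → Nat → Nat) × (Nat → Nat → Nat))).foldl
        (fun rules t => rules.insert (orientB q t.1 t.2) rg) (d.insert q rg)) := by
  simp only [show List.range 4 = [0,1,2,3] from rfl, List.foldl_cons, List.foldl_nil]
  rw [flipA_long rfl, rotA_long rfl]
  simp only [rotA_ofCells, orientB_eq]
  rw [show (ofCells q.length fun i j => cellOf q (q.length - 1 - (q.length - 1 - i)) (q.length - 1 - j))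
        = (ofCells q.length fun i j => cellOf q i (q.length - 1 - j)) from
      ofCells_congr (by intro i j hi hj; congr 1; omega),
    show (ofCells q.length fun i j => cellOf q (q.length - 1 - j) (q.length - 1 - (q.length - 1 - i)))
        = (ofCells q.length fun i j => cellOf q (q.length - 1 - j) i) from
      ofCells_congr (by intro i j hi hj; congr 1; omega),
    show (ofCells q.length fun i j => cellOf q (q.length - 1 - (q.length - 1 - j)) (q.length - 1 - (q.length - 1 - i)))
        = (ofCells q.length fun i j => cellOf q j i) from
      ofCells_congr (by intro i j hi hj; congr 1 <;> omega)]

theorem step_eq (d : PySem.Dict (List String) (List String)) (line : String) :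
    stepA d line = stepB d line := by
  unfold stepA stepB
  cases hs : PySem.Str.split? line " => " with
  | none => rfl
  | some parts =>
    rcases parts with _ | ⟨l, _ | ⟨r, _ | ⟨x, rest⟩⟩⟩
    · rfl
    · rfl
    · dsimp only
      generalize (PySem.Str.split? r "/").getD [] = rg
      generalize (PySem.Str.split? l "/").getD [] = g
      exact core_eq d rg g
    · rfl

theorem parse_eq (inp : String) : parse inp = parse_alt inp := by
  unfold parse parse_alt
  have h : stepA = stepB := funext fun d => funext fun line => step_eq d line
  rw [h]

-- ===== VERDICT (by name: the statement is the Claim_ definition above) =====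
theorem parse_spec : Claim_equal_parse := by
  intro inp _ _
  exact parse_eq inp
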